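-- pv_equiv track=rewrite | github.com/GoBeromsu/Untangling-multi-concern-commits-using-SLM | datasets/hqcm/generate_tangled.py | generate_concern_filename
-- ===== SOURCE A (Python) =====
-- from typing import List, Dict, Any
--
-- TYPE_MAPPING = {
--     "feat": "fe",
--     "fix": "fi",
--     "refactor": "re",
--     "test": "te",
--     "style": "st",
--     "docs": "do",
--     "build": "bu",
--     "cicd": "ci",
-- }
--
-- PRIORITY_ORDER = ["ci", "bu", "do", "fe", "fi", "re", "te", "st"]
--
-- def generate_concern_filename(
--     concerns: List[str], allow_same_types: bool, count: int, num_cases: int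
-- ) -> str:
--     """Generate filename: c{N}_t{type_count}_s{sample_count}_{u|m}_{abbrev_list}"""
--     abbrevs = [TYPE_MAPPING.get(concern, concern[:2]) for concern in concerns]
--     label_type = "m" if allow_same_types else "u"
--
--     ordered_abbrevs = sorted(
--         abbrevs,
--         key=lambda x: (
--             PRIORITY_ORDER.index(x) if x in PRIORITY_ORDER else len(PRIORITY_ORDER)
--         ),
--     )
--
--     return f"c{count}_t{len(concerns)}_s{num_cases}_{label_type}_{'_'.join(ordered_abbrevs)}"
-- ===== SOURCE B (Python) =====
-- from typing import List
--
-- TYPE_MAPPING = {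
--     "feat": "fe",
--     "fix": "fi",
--     "refactor": "re",
--     "test": "te",
--     "style": "st",
--     "docs": "do",
--     "build": "bu",
--     "cicd": "ci",
-- }
--
-- PRIORITY_ORDER = ["ci", "bu", "do", "fe", "fi", "re", "te", "st"]
--
-- def generate_concern_filename(
--     concerns: List[str], allow_same_types: bool, count: int, num_cases: int
-- ) -> str:
--     """Generate filename: c{N}_t{type_count}_s{sample_count}_{u|m}_{abbrev_list}"""
--     abbrevs = [TYPE_MAPPING.get(c, c[:2]) for c in concerns]
--     # gather, without sorting: for each priority abbreviation in order, all its
--     # occurrences; then every non-priority abbreviation in original order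
--     in_priority = [a for p in PRIORITY_ORDER for a in abbrevs if a == p]
--     rest = [a for a in abbrevs if a not in PRIORITY_ORDER]
--     parts = [
--         "c%d" % count,
--         "t%d" % len(concerns),
--         "s%d" % num_cases,
--         "m" if allow_same_types else "u",
--         "_".join(in_priority + rest),
--     ]
--     return "_".join(parts)
-- ===== Notes on version B (the rewrite author's own statement) =====
-- stated objective: alternative
-- what changed: Replaces the stable comparison sort keyed by PRIORITY_ORDER.index with sort-free gathering: one filtering sweep per priority abbreviation (collecting its occurrences in order) followed by the non-priority abbreviations in original order, and builds the filename by joining a parts list instead of an f-string.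
import Mathlib
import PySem

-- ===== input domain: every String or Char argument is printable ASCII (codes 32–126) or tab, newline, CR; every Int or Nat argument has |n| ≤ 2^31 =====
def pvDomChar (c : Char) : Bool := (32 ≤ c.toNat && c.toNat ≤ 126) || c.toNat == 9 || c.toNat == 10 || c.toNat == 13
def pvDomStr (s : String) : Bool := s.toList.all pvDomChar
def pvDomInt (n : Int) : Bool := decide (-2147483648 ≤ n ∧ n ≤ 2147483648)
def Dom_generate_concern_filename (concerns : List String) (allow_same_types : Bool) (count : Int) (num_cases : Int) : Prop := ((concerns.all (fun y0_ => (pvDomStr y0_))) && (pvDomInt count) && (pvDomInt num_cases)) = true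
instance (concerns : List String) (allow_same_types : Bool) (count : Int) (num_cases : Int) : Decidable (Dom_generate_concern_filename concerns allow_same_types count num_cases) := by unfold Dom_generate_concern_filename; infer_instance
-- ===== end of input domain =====

-- ===== PORT A =====
-- B gathers the abbreviations sort-free (one filtering sweep per priority entry, then the
-- non-priority leftovers) instead of A's stable sort by priority index; return values proved equal.
def TYPE_MAPPING : PySem.Dict String String := PySem.Dict.ofList
  [("feat", "fe"), ("fix", "fi"), ("refactor", "re"), ("test", "te"),
   ("style", "st"), ("docs", "do"), ("build", "bu"), ("cicd", "ci")]

def PRIORITY_ORDER : List String := ["ci", "bu", "do", "fe", "fi", "re", "te", "st"]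

-- A's sort key: PRIORITY_ORDER.index(x) if x in PRIORITY_ORDER else len(PRIORITY_ORDER)
def pvKey (x : String) : Nat :=
  match PySem.List.index? PRIORITY_ORDER x with
  | some i => i
  | none => PRIORITY_ORDER.length

def generate_concern_filename (concerns : List String) (allow_same_types : Bool) (count : Int) (num_cases : Int) : String :=
  let abbrevs := concerns.map (fun concern =>
    TYPE_MAPPING.getD concern (PySem.Str.slice concern none (some 2)))
  let label_type := if allow_same_types then "m" else "u"
  let ordered_abbrevs := PySem.List.sorted abbrevs pvKey
  "c" ++ PySem.Int.toStr count ++ "_t" ++ PySem.Int.toStr (concerns.length : Int) ++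
    "_s" ++ PySem.Int.toStr num_cases ++ "_" ++ label_type ++ "_" ++
    PySem.Str.join "_" ordered_abbrevs

-- ===== PORT B =====
def generate_concern_filename_alt (concerns : List String) (allow_same_types : Bool) (count : Int) (num_cases : Int) : String :=
  let abbrevs := concerns.map (fun c =>
    TYPE_MAPPING.getD c (PySem.Str.slice c none (some 2)))
  let in_priority := PRIORITY_ORDER.flatMap (fun p => abbrevs.filter (fun a => a == p))
  let rest := abbrevs.filter (fun a => !(PRIORITY_ORDER.contains a))
  let parts : List String :=
    ["c" ++ PySem.Int.toStr count,
     "t" ++ PySem.Int.toStr (concerns.length : Int),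
     "s" ++ PySem.Int.toStr num_cases,
     if allow_same_types then "m" else "u",
     PySem.Str.join "_" (in_priority ++ rest)]
  PySem.Str.join "_" parts

-- ===== PRECONDITION & SPEC =====
def Spec_generate_concern_filename (concerns : List String) (allow_same_types : Bool) (count : Int) (num_cases : Int) (out : String) : Prop := out = generate_concern_filename_alt concerns allow_same_types count num_cases
instance (concerns : List String) (allow_same_types : Bool) (count : Int) (num_cases : Int) (out : String) : Decidable (Spec_generate_concern_filename concerns allow_same_types count num_cases out) := by unfold Spec_generate_concern_filename; infer_instance

-- ===== CLAIM (what is proved, stated in full; the proofs are below) =====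
def Claim_equal_generate_concern_filename : Prop := ∀ (concerns : List String) (allow_same_types : Bool) (count : Int) (num_cases : Int), Dom_generate_concern_filename concerns allow_same_types count num_cases → Spec_generate_concern_filename concerns allow_same_types count num_cases (generate_concern_filename concerns allow_same_types count num_cases)

-- ===== LEMMAS AND PROOFS =====
theorem pvKey_eq (x : String) : pvKey x =
    if x = "ci" then 0 else if x = "bu" then 1 else if x = "do" then 2 else
    if x = "fe" then 3 else if x = "fi" then 4 else if x = "re" then 5 else
    if x = "te" then 6 else if x = "st" then 7 else 8 := by
  split_ifs with h1 h2 h3 h4 h5 h6 h7 h8 <;>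
    first
    | (subst_vars; decide)
    | · have hn : List.idxOf? x PRIORITY_ORDER = none := by
          rw [← PySem.List.index?_eq_idxOf?, PySem.List.index?_eq_none_iff]
          simp [PRIORITY_ORDER, h1, h2, h3, h4, h5, h6, h7, h8]
        simp only [PRIORITY_ORDER] at hn
        simp [pvKey, PySem.List.index?_eq_idxOf?, PRIORITY_ORDER, hn]

theorem pvKey_le (x : String) : pvKey x ≤ 8 := by
  rw [pvKey_eq]; split_ifs <;> omega

theorem insertBy_split {α : Type} (before : α → α → Bool) (x : α) (L1 L2 : List α)
    (h1 : ∀ y ∈ L1, before x y = false) (h2 : ∀ y ∈ L2, before x y = true) :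
    PySem.List.insertBy before x (L1 ++ L2) = L1 ++ x :: L2 := by
  induction L1 with
  | nil =>
    cases L2 with
    | nil => simp [PySem.List.insertBy]
    | cons y t => simp [PySem.List.insertBy, h2 y (by simp)]
  | cons a L1 ih =>
    simp only [List.cons_append, PySem.List.insertBy, h1 a (by simp),
      Bool.false_eq_true, if_false]
    exact congrArg (a :: ·) (ih (fun y hy => h1 y (by simp [hy])))

def pvBlocks (xs : List String) : List String :=
  (List.range 9).flatMap (fun i => xs.filter (fun x => pvKey x == i))

theorem flatMap_congr_mem {α β : Type} {l : List α} {f g : α → List β}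
    (h : ∀ a ∈ l, f a = g a) : l.flatMap f = l.flatMap g := by
  induction l with
  | nil => rfl
  | cons a l ih =>
    simp only [List.flatMap_cons, h a (by simp), ih (fun b hb => h b (by simp [hb]))]

theorem sorted_eq_pvBlocks (xs : List String) :
    PySem.List.sorted xs pvKey = pvBlocks xs := by
  induction xs using List.reverseRecOn with
  | nil => simp [PySem.List.sorted_eq_foldl_insertBy, pvBlocks]
  | append_singleton xs x ih =>
    rw [PySem.List.sorted_eq_foldl_insertBy, List.foldl_append, List.foldl_cons,
      List.foldl_nil, ← PySem.List.sorted_eq_foldl_insertBy, ih]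
    have hk : pvKey x ≤ 8 := pvKey_le x
    have h9 : 9 = (pvKey x + 1) + (8 - pvKey x) := by omega
    have hsplit : List.range 9 =
        List.range (pvKey x + 1) ++ (List.range (8 - pvKey x)).map (fun j => pvKey x + 1 + j) := by
      rw [h9, List.range_add]
    unfold pvBlocks
    rw [hsplit, List.flatMap_append, List.flatMap_append]
    rw [insertBy_split _ x _ _
      (by
        intro y hy
        simp only [List.mem_flatMap, List.mem_range] at hy
        obtain ⟨i, hi, hyf⟩ := hy
        have := List.of_mem_filter hyf
        simp only [beq_iff_eq] at this
        simp [this]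
        omega)
      (by
        intro y hy
        simp only [List.flatMap_map, List.mem_flatMap, List.mem_range] at hy
        obtain ⟨i, hi, hyf⟩ := hy
        have := List.of_mem_filter hyf
        simp only [beq_iff_eq] at this
        simp [this]
        omega)]
    have hleft :
        (List.range (pvKey x + 1)).flatMap (fun i => (xs ++ [x]).filter (fun y => pvKey y == i)) =
        (List.range (pvKey x + 1)).flatMap (fun i => xs.filter (fun y => pvKey y == i)) ++ [x] := by
      rw [List.range_succ, List.flatMap_append, List.flatMap_append]
      rw [flatMap_congr_mem (f := fun i => (xs ++ [x]).filter (fun y => pvKey y == i))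
        (g := fun i => xs.filter (fun y => pvKey y == i))
        (by
          intro i hi
          simp only [List.mem_range] at hi
          show List.filter (fun y => pvKey y == i) (xs ++ [x]) = List.filter (fun y => pvKey y == i) xs
          rw [List.filter_append]
          have : (pvKey x == i) = false := by simp; omega
          simp [this])]
      simp [List.filter_append]
    have hright :
        ((List.range (8 - pvKey x)).map (fun j => pvKey x + 1 + j)).flatMap
            (fun i => (xs ++ [x]).filter (fun y => pvKey y == i)) =
        ((List.range (8 - pvKey x)).map (fun j => pvKey x + 1 + j)).flatMap
            (fun i => xs.filter (fun y => pvKey y == i)) := by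
      apply flatMap_congr_mem
      intro i hi
      simp only [List.mem_map, List.mem_range] at hi
      obtain ⟨j, hj, rfl⟩ := hi
      show List.filter (fun y => pvKey y == pvKey x + 1 + j) (xs ++ [x]) =
        List.filter (fun y => pvKey y == pvKey x + 1 + j) xs
      rw [List.filter_append]
      have : (pvKey x == pvKey x + 1 + j) = false := by simp; omega
      simp [this]
    rw [hleft, hright]
    simp

set_option maxHeartbeats 1000000 in
theorem blocks_eq (xs : List String) :
    pvBlocks xs =
      PRIORITY_ORDER.flatMap (fun p => xs.filter (fun a => a == p)) ++
        xs.filter (fun a => !(PRIORITY_ORDER.contains a)) := by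
  have hpred : ∀ (i : Nat) (p : String), (∀ x : String, (pvKey x == i) = (x == p)) →
      xs.filter (fun x => pvKey x == i) = xs.filter (fun a => a == p) := by
    intro i p h
    exact List.filter_congr (fun x _ => h x)
  have hrest : xs.filter (fun x => pvKey x == 8) = xs.filter (fun a => !(PRIORITY_ORDER.contains a)) := by
    apply List.filter_congr
    intro x _
    rw [pvKey_eq]
    split_ifs with h1 h2 h3 h4 h5 h6 h7 h8 <;>
      first | (subst_vars; decide) | simp_all [PRIORITY_ORDER]
  unfold pvBlocks
  rw [show List.range 9 = [0,1,2,3,4,5,6,7,8] from by decide]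
  simp only [List.flatMap_cons, List.flatMap_nil, List.append_nil, PRIORITY_ORDER]
  rw [hpred 0 "ci" (by intro x; rw [pvKey_eq]; split_ifs <;> first | (subst_vars; decide) | simp_all),
      hpred 1 "bu" (by intro x; rw [pvKey_eq]; split_ifs <;> first | (subst_vars; decide) | simp_all),
      hpred 2 "do" (by intro x; rw [pvKey_eq]; split_ifs <;> first | (subst_vars; decide) | simp_all),
      hpred 3 "fe" (by intro x; rw [pvKey_eq]; split_ifs <;> first | (subst_vars; decide) | simp_all),
      hpred 4 "fi" (by intro x; rw [pvKey_eq]; split_ifs <;> first | (subst_vars; decide) | simp_all),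
      hpred 5 "re" (by intro x; rw [pvKey_eq]; split_ifs <;> first | (subst_vars; decide) | simp_all),
      hpred 6 "te" (by intro x; rw [pvKey_eq]; split_ifs <;> first | (subst_vars; decide) | simp_all),
      hpred 7 "st" (by intro x; rw [pvKey_eq]; split_ifs <;> first | (subst_vars; decide) | simp_all),
      hrest]
  simp only [List.append_assoc, PRIORITY_ORDER]

theorem str_ext (s t : String) (h : s.toList = t.toList) : s = t := by
  have := congrArg String.ofList h
  simpa using this

theorem join_parts (a b c d e : String) :
    PySem.Str.join "_" [a, b, c, d, e] =
      a ++ "_" ++ b ++ "_" ++ c ++ "_" ++ d ++ "_" ++ e := by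
  apply str_ext
  simp [PySem.Str.join, PySem.Chars.join, List.intercalate, String.toList_append]

-- ===== VERDICT (by name: the statement is the Claim_ definition above) =====
theorem generate_concern_filename_spec : Claim_equal_generate_concern_filename := by
  intro concerns allow_same_types count num_cases _
  unfold Spec_generate_concern_filename
  simp only [generate_concern_filename, generate_concern_filename_alt, join_parts,
    sorted_eq_pvBlocks, blocks_eq]
  apply str_ext
  simp [String.toList_append]
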